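-- pv_equiv track=rewrite | github.com/loganstartoni/RTS_Labs_Code_Challenge | RTS_Labs.py | aboveBelowEqual
-- ===== SOURCE A (Python) =====
-- from typing import List, Dict
--
-- def aboveBelowEqual(input_list: List[int], comparison_number: int) -> Dict:
--     """
--         Take a list and an integer and returns the number of values above, below or Equal to that value.
--         (Corrects the assumption above.)
--
--     :param input_list:  An unsorted collection of integers (the list)
--     :param comparison_number: an integer (the comparison value)
--     :return: a hash/object/map/etc. with the keys "above" and "below" with the corresponding count of integers
--     from the list that are above or below the comparison value
--     """
--     output = {
--         "above": 0,
--         "below": 0,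
--         "equal": 0
--     }
--     for element in input_list:
--         if element < comparison_number:
--             output["below"] = output["below"] + 1
--         elif element > comparison_number:
--             output["above"] = output["above"] + 1
--         else:
--             output["equal"] = output["equal"] + 1
--     return output
-- ===== SOURCE B (Python) =====
-- def _bisect_left(a, x):
--     lo, hi = 0, len(a)
--     while lo < hi:
--         mid = (lo + hi) // 2
--         if a[mid] < x:
--             lo = mid + 1
--         else:
--             hi = mid
--     return lo
--
--
-- def _bisect_right(a, x):
--     lo, hi = 0, len(a)
--     while lo < hi:
--         mid = (lo + hi) // 2
--         if x < a[mid]: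
--             hi = mid
--         else:
--             lo = mid + 1
--     return lo
--
--
-- def aboveBelowEqual(input_list, comparison_number):
--     s = sorted(input_list)
--     below = _bisect_left(s, comparison_number)
--     equal = _bisect_right(s, comparison_number) - below
--     return {"above": len(s) - below - equal, "below": below, "equal": equal}
-- ===== Notes on version B (the rewrite author's own statement) =====
-- stated objective: alternative
-- what changed: Replaces the linear branching tally into a dict by sort-then-binary-search: sort a copy, take bisect_left/bisect_right of the comparison value, and derive the three counts from the two indices and the length.
import Mathlib
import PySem

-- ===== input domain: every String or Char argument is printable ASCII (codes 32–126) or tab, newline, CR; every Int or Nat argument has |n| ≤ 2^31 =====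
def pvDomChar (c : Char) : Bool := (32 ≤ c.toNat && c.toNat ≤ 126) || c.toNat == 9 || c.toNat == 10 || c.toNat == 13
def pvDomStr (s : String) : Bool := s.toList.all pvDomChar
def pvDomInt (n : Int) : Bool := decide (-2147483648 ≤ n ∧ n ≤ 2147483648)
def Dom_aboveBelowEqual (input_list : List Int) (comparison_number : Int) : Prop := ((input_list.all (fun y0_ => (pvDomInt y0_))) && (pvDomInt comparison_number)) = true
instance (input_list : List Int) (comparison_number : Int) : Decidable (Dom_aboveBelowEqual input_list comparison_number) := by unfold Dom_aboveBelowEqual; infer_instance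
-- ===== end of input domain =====

-- B replaces A's linear branching tally by sort + two binary searches (bisect_left/bisect_right),
-- deriving the three counts from the two indices and the length (objective: alternative).

-- ===== PORT A =====
def aboveBelowEqual (input_list : List Int) (comparison_number : Int) : List (String × Int) :=
  let output : PySem.Dict String Int := PySem.Dict.mk [("above", 0), ("below", 0), ("equal", 0)]
  (input_list.foldl (fun output element =>
    if element < comparison_number then output.insert "below" (output.getD "below" 0 + 1)
    else if element > comparison_number then output.insert "above" (output.getD "above" 0 + 1)
    else output.insert "equal" (output.getD "equal" 0 + 1)) output).items

-- ===== PORT B =====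
-- Source B's hand-written _bisect_left/_bisect_right are exactly the loops of
-- PySem.List.bisectLeft / PySem.List.bisectRight (lo/hi binary search, mid = (lo+hi)//2).
def aboveBelowEqual_alt (input_list : List Int) (comparison_number : Int) : List (String × Int) :=
  let s := PySem.List.sorted input_list (fun x => x) false
  let below : Int := (PySem.List.bisectLeft s comparison_number : Int)
  let equal : Int := (PySem.List.bisectRight s comparison_number : Int) - below
  [("above", (s.length : Int) - below - equal), ("below", below), ("equal", equal)]

-- ===== PRECONDITION & SPEC =====
def Spec_aboveBelowEqual (input_list : List Int) (comparison_number : Int) (out : List (String × Int)) : Prop := out = aboveBelowEqual_alt input_list comparison_number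
instance (input_list : List Int) (comparison_number : Int) (out : List (String × Int)) : Decidable (Spec_aboveBelowEqual input_list comparison_number out) := by unfold Spec_aboveBelowEqual; infer_instance

-- ===== CLAIM (what is proved, stated in full; the proofs are below) =====
def Claim_equal_aboveBelowEqual : Prop := ∀ (input_list : List Int) (comparison_number : Int), Dom_aboveBelowEqual input_list comparison_number → Spec_aboveBelowEqual input_list comparison_number (aboveBelowEqual input_list comparison_number)

-- ===== LEMMAS AND PROOFS =====

-- A's fold, run from arbitrary starting counts, adds the three countP's.
theorem abe_fold_inv (c : Int) (l : List Int) : ∀ (a b e : Int),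
    l.foldl (fun output element =>
      if element < c then output.insert "below" (output.getD "below" 0 + 1)
      else if element > c then output.insert "above" (output.getD "above" 0 + 1)
      else output.insert "equal" (output.getD "equal" 0 + 1))
      (PySem.Dict.mk [("above", a), ("below", b), ("equal", e)]) =
    PySem.Dict.mk [("above", a + (l.countP (fun y => decide (c < y)) : Int)),
                   ("below", b + (l.countP (fun y => decide (y < c)) : Int)),
                   ("equal", e + (l.countP (fun y => decide (y = c)) : Int))] := by
  induction l with
  | nil => intro a b e; simp
  | cons x t ih =>
    intro a b e
    simp only [List.foldl_cons, List.countP_cons]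
    by_cases h1 : x < c
    · have : (PySem.Dict.mk [("above", a), ("below", b), ("equal", e)] : PySem.Dict String Int).insert
          "below" ((PySem.Dict.mk [("above", a), ("below", b), ("equal", e)] : PySem.Dict String Int).getD "below" 0 + 1)
          = PySem.Dict.mk [("above", a), ("below", b + 1), ("equal", e)] := by
        simp [PySem.Dict.insert, PySem.Dict.getD, PySem.Dict.get?, PySem.Dict.contains]
      rw [if_pos h1, this, ih]
      have hx1 : (decide (c < x)) = false := by simp; omega
      have hx2 : (decide (x < c)) = true := by simp [h1]
      have hx3 : (decide (x = c)) = false := by simp; omega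
      simp [hx1, hx2, hx3]; ring
    · by_cases h2 : x > c
      · have : (PySem.Dict.mk [("above", a), ("below", b), ("equal", e)] : PySem.Dict String Int).insert
            "above" ((PySem.Dict.mk [("above", a), ("below", b), ("equal", e)] : PySem.Dict String Int).getD "above" 0 + 1)
            = PySem.Dict.mk [("above", a + 1), ("below", b), ("equal", e)] := by
          simp [PySem.Dict.insert, PySem.Dict.getD, PySem.Dict.get?, PySem.Dict.contains]
        rw [if_neg h1, if_pos h2, this, ih]
        have hx1 : (decide (c < x)) = true := by simp [h2]
        have hx2 : (decide (x < c)) = false := by simp; omega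
        have hx3 : (decide (x = c)) = false := by simp; omega
        simp [hx1, hx2, hx3]; ring
      · have : (PySem.Dict.mk [("above", a), ("below", b), ("equal", e)] : PySem.Dict String Int).insert
            "equal" ((PySem.Dict.mk [("above", a), ("below", b), ("equal", e)] : PySem.Dict String Int).getD "equal" 0 + 1)
            = PySem.Dict.mk [("above", a), ("below", b), ("equal", e + 1)] := by
          simp [PySem.Dict.insert, PySem.Dict.getD, PySem.Dict.get?, PySem.Dict.contains]
        rw [if_neg h1, if_neg h2, this, ih]
        have hx1 : (decide (c < x)) = false := by simp; omega
        have hx2 : (decide (x < c)) = false := by simp [h1]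
        have hx3 : (decide (x = c)) = true := by simp; omega
        simp [hx1, hx2, hx3]; ring

-- On a sorted list, countP (· < x) is bisect_left.
theorem countP_lt_eq_bisectLeft (xs : List Int) (x : Int) (h : xs.Pairwise (· ≤ ·)) :
    xs.countP (fun y => decide (y < x)) = PySem.List.bisectLeft xs x := by
  obtain ⟨hk, hlt, hge⟩ := PySem.List.bisectLeft_spec xs x h
  set k := PySem.List.bisectLeft xs x with hkdef
  have hsplit := List.take_append_drop k xs
  have : xs.countP (fun y => decide (y < x)) =
      (xs.take k).countP (fun y => decide (y < x)) + (xs.drop k).countP (fun y => decide (y < x)) := by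
    conv_lhs => rw [← hsplit]
    exact List.countP_append
  rw [this]
  have htake : (xs.take k).countP (fun y => decide (y < x)) = k := by
    have hall : ∀ a ∈ xs.take k, (fun y => decide (y < x)) a = true := by
      intro a ha
      obtain ⟨j, hj, rfl⟩ := List.mem_iff_getElem.mp ha
      rw [List.getElem_take]
      have hjlen : j < xs.length := lt_of_lt_of_le (lt_of_lt_of_le hj (by simp)) (le_refl _)
      have hjk : j < k := lt_of_lt_of_le hj (by simp [List.length_take])
      simpa using hlt j hjlen hjk
    rw [List.countP_eq_length.mpr hall, List.length_take]
    omega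
  have hdrop : (xs.drop k).countP (fun y => decide (y < x)) = 0 := by
    rw [List.countP_eq_zero]
    intro a ha
    obtain ⟨j, hj, rfl⟩ := List.mem_iff_getElem.mp ha
    rw [List.getElem_drop]
    have hjlen : k + j < xs.length := by simp [List.length_drop] at hj; omega
    have := hge (k + j) hjlen (by omega)
    simp; omega
  omega

-- On a sorted list, countP (· ≤ x) is bisect_right.
theorem countP_le_eq_bisectRight (xs : List Int) (x : Int) (h : xs.Pairwise (· ≤ ·)) :
    xs.countP (fun y => decide (y ≤ x)) = PySem.List.bisectRight xs x := by
  obtain ⟨hk, hle, hgt⟩ := PySem.List.bisectRight_spec xs x h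
  set k := PySem.List.bisectRight xs x with hkdef
  have hsplit := List.take_append_drop k xs
  have : xs.countP (fun y => decide (y ≤ x)) =
      (xs.take k).countP (fun y => decide (y ≤ x)) + (xs.drop k).countP (fun y => decide (y ≤ x)) := by
    conv_lhs => rw [← hsplit]
    exact List.countP_append
  rw [this]
  have htake : (xs.take k).countP (fun y => decide (y ≤ x)) = k := by
    have hall : ∀ a ∈ xs.take k, (fun y => decide (y ≤ x)) a = true := by
      intro a ha
      obtain ⟨j, hj, rfl⟩ := List.mem_iff_getElem.mp ha
      rw [List.getElem_take]
      have hjlen : j < xs.length := lt_of_lt_of_le (lt_of_lt_of_le hj (by simp)) (le_refl _)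
      have hjk : j < k := lt_of_lt_of_le hj (by simp [List.length_take])
      simpa using hle j hjlen hjk
    rw [List.countP_eq_length.mpr hall, List.length_take]
    omega
  have hdrop : (xs.drop k).countP (fun y => decide (y ≤ x)) = 0 := by
    rw [List.countP_eq_zero]
    intro a ha
    obtain ⟨j, hj, rfl⟩ := List.mem_iff_getElem.mp ha
    rw [List.getElem_drop]
    have hjlen : k + j < xs.length := by simp [List.length_drop] at hj; omega
    have := hgt (k + j) hjlen (by omega)
    simp; omega
  omega

-- countP (· ≤ x) splits into strictly-below plus equal.
theorem countP_le_split (xs : List Int) (x : Int) :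
    xs.countP (fun y => decide (y ≤ x)) =
    xs.countP (fun y => decide (y < x)) + xs.countP (fun y => decide (y = x)) := by
  induction xs with
  | nil => simp
  | cons a t ih =>
    simp only [List.countP_cons, ih]
    by_cases h1 : a < x
    · have h2 : ¬ (a = x) := by omega
      have h3 : a ≤ x := by omega
      simp [h1, h2, h3]; omega
    · by_cases h2 : a = x
      · have h3 : a ≤ x := by omega
        simp [h2]; omega
      · have h3 : ¬ (a ≤ x) := by omega
        simp [h1, h2, h3]
-- countP (x < ·) plus countP (· ≤ x) is the length.
theorem countP_gt_add_le (xs : List Int) (x : Int) :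
    xs.countP (fun y => decide (x < y)) + xs.countP (fun y => decide (y ≤ x)) = xs.length := by
  induction xs with
  | nil => simp
  | cons a t ih =>
    simp only [List.countP_cons, List.length_cons]
    by_cases h1 : x < a
    · have h2 : ¬ (a ≤ x) := by omega
      simp [h1, h2]; omega
    · have h2 : a ≤ x := by omega
      simp [h1, h2]; omega

-- ===== VERDICT (by name: the statement is the Claim_ definition above) =====
theorem aboveBelowEqual_spec : Claim_equal_aboveBelowEqual := by
  intro l c _
  unfold Spec_aboveBelowEqual aboveBelowEqual aboveBelowEqual_alt
  simp only []
  rw [abe_fold_inv]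
  set s := PySem.List.sorted l (fun x => x) false with hs
  have hperm : s.Perm l := PySem.List.sorted_perm l (fun x => x) false
  have hpw : s.Pairwise (· ≤ ·) := PySem.List.sorted_pairwise l (fun x => x)
  have h1 : l.countP (fun y => decide (y < c)) = PySem.List.bisectLeft s c := by
    rw [← hperm.countP_eq (fun y => decide (y < c))]
    exact countP_lt_eq_bisectLeft s c hpw
  have h2 : l.countP (fun y => decide (y ≤ c)) = PySem.List.bisectRight s c := by
    rw [← hperm.countP_eq (fun y => decide (y ≤ c))]
    exact countP_le_eq_bisectRight s c hpw
  have h3 := countP_le_split l c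
  have h4 := countP_gt_add_le l c
  have hlen : s.length = l.length := hperm.length_eq
  simp only [List.cons.injEq, Prod.mk.injEq, and_true, true_and]
  omega
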